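-- pv_equiv track=rewrite | github.com/oatsu-gh/ENUNU | synthesis/extensions/f0_smoother.py | reduce_indices
-- ===== SOURCE A (Python) =====
-- from copy import copy
--
-- def reduce_indices(indices):
--     """時間的に近い2点で急速なf0変化が検出された場合、両方補正すると変になるので削減する。
--
--     # 連続して検出された場合
--     >>> reduce_indices([10, 11])
--     [10]
--
--     # 1つだけ間をあけて検出された場合
--     >>> reduce_indices([10, 12])
--     [11]
--     >>> reduce_indices([10, 12, 16])
--     [11, 16]
--
--     >>> reduce_indices([10, 13])
--     [11]
--
--     # 2回連続で処理する場合(1)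
--     >>> reduce_indices([10, 11, 12])
--     [11]
--     >>> reduce_indices([10, 12, 14])
--     [12]
--     >>> reduce_indices([10, 13, 14])
--     [12]
--     >>> reduce_indices([10, 11, 13])
--     [11]
--     >>> reduce_indices([10, 12, 13])
--     [12]
--
--     """
--     indices = copy(indices)
--
--     for i, _ in enumerate(indices[:-1]):
--         delta = indices[i+1] - indices[i]
--         if delta == 1:
--             indices[i] = None
--             indices[i + 1] = indices[i + 1] - 1
--         elif delta == 2:
--             indices[i] = None
--             indices[i + 1] = indices[i + 1] - 1
--         elif delta == 3:
--             indices[i] = None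
--             indices[i + 1] = indices[i + 1] - 2
--         else:
--             pass
--     indices = [idx for idx in indices if idx is not None]
--
--     return indices
-- ===== SOURCE B (Python) =====
-- def reduce_indices(indices):
--     # Maintain the reduced list directly: merging an element into the current
--     # tail uses the identity merged = min(cur - 1, tail + 1), which collapses
--     # A's three delta cases (delta 1/2 -> cur-1, delta 3 -> cur-2 = tail+1).
--     out = []
--     for cur in indices:
--         if out and out[-1] < cur <= out[-1] + 3:
--             out[-1] = min(cur - 1, out[-1] + 1)
--         else:
--             out.append(cur)
--     return out
-- ===== Notes on version B (the rewrite author's own statement) =====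
-- stated objective: simpler
-- what changed: Replaces the None-marking of a copied list, the three-way delta case analysis and the final filter pass with direct maintenance of the reduced list, merging an element into its last entry via the algebraic identity merged = min(cur-1, last+1).
import Mathlib
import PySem

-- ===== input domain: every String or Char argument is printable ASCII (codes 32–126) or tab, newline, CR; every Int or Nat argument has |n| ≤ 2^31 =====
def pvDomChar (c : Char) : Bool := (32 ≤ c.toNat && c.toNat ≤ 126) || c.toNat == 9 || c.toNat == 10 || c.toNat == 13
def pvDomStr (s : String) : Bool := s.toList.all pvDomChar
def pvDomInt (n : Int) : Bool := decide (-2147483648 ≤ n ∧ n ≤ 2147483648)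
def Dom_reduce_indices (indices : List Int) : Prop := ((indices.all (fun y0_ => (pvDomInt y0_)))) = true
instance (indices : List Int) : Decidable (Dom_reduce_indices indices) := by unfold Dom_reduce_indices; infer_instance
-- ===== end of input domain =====

-- B maintains the reduced list directly, merging into its last entry with min (cur-1) (last+1),
-- instead of A's None-marking of a copied list plus a final filter (objective: simpler;
-- return value only — A mutates only its local copy).

-- ===== PORT A =====
-- A's loop body: state is the copied list with consumed cells set to none (Python None);
-- the match's fallthrough branch is unreachable in Python (indices stay in range, read cells are never None).
def reduceStepA (st : List (Option Int)) (i : Nat) : List (Option Int) :=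
  match st[i+1]?, st[i]? with
  | some (some a), some (some b) =>
    let delta := a - b
    if delta = 1 then (st.set i none).set (i+1) (some (a-1))
    else if delta = 2 then (st.set i none).set (i+1) (some (a-1))
    else if delta = 3 then (st.set i none).set (i+1) (some (a-2))
    else st
  | _, _ => st

def reduce_indices (indices : List Int) : List Int :=
  let st := (List.range (indices.length - 1)).foldl reduceStepA (indices.map some)
  st.filterMap id

-- ===== PORT B =====
-- B's loop body: `if out and out[-1] < cur <= out[-1] + 3: out[-1] = min(cur-1, out[-1]+1) else: out.append(cur)`
def reduceStepB (out : List Int) (cur : Int) : List Int :=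
  match out.getLast? with
  | some last =>
    if last < cur ∧ cur ≤ last + 3 then out.dropLast ++ [min (cur - 1) (last + 1)]
    else out ++ [cur]
  | none => out ++ [cur]

def reduce_indices_alt (indices : List Int) : List Int :=
  indices.foldl reduceStepB []

-- ===== PRECONDITION & SPEC =====
def Spec_reduce_indices (indices : List Int) (out : List Int) : Prop := out = reduce_indices_alt indices
instance (indices : List Int) (out : List Int) : Decidable (Spec_reduce_indices indices out) := by unfold Spec_reduce_indices; infer_instance

-- ===== CLAIM (what is proved, stated in full; the proofs are below) =====
def Claim_equal_reduce_indices : Prop := ∀ (indices : List Int), Dom_reduce_indices indices → Spec_reduce_indices indices (reduce_indices indices)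

-- ===== LEMMAS AND PROOFS =====

-- Common recursive characterisation: reduce with running active value `prev`.
def redSpec (prev : Int) : List Int → List Int
  | [] => [prev]
  | cur :: rest =>
    let d := cur - prev
    if 1 ≤ d ∧ d ≤ 3 then redSpec (cur - (if d ≤ 2 then 1 else 2)) rest
    else prev :: redSpec cur rest

theorem redSpec_cons (prev cur : Int) (rest : List Int) :
    redSpec prev (cur :: rest)
      = if 1 ≤ cur - prev ∧ cur - prev ≤ 3 then redSpec (cur - (if cur - prev ≤ 2 then 1 else 2)) rest
        else prev :: redSpec cur rest := rfl

theorem foldB_eq_redSpec (rest : List Int) : ∀ (out : List Int) (prev : Int),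
    rest.foldl reduceStepB (out ++ [prev]) = out ++ redSpec prev rest := by
  induction rest with
  | nil => intro out prev; simp [redSpec]
  | cons cur rest ih =>
    intro out prev
    rw [List.foldl_cons, redSpec_cons]
    have hstep : reduceStepB (out ++ [prev]) cur
        = if prev < cur ∧ cur ≤ prev + 3 then out ++ [min (cur - 1) (prev + 1)]
          else (out ++ [prev]) ++ [cur] := by
      simp [reduceStepB]
    rw [hstep]
    by_cases h : 1 ≤ cur - prev ∧ cur - prev ≤ 3
    · rw [if_pos (by omega : prev < cur ∧ cur ≤ prev + 3), if_pos h, ih]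
      have : min (cur - 1) (prev + 1) = cur - (if cur - prev ≤ 2 then 1 else 2) := by
        split_ifs <;> omega
      rw [this]
    · rw [if_neg (by omega : ¬ (prev < cur ∧ cur ≤ prev + 3)), if_neg h, ih,
        List.append_assoc, List.singleton_append]

theorem foldA_eq_redSpec (rest : List Int) : ∀ (pre : List (Option Int)) (prev : Int),
    ((List.range' pre.length rest.length).foldl reduceStepA
        (pre ++ some prev :: rest.map some)).filterMap id
      = pre.filterMap id ++ redSpec prev rest := by
  induction rest with
  | nil => intro pre prev; simp [redSpec]
  | cons cur rest ih =>
    intro pre prev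
    rw [List.length_cons, List.range'_succ, List.foldl_cons]
    have hget0 : (pre ++ some prev :: (cur :: rest).map some)[pre.length]? = some (some prev) := by
      simp
    have hget1 : (pre ++ some prev :: (cur :: rest).map some)[pre.length + 1]? = some (some cur) := by
      rw [List.getElem?_append_right (by omega)]
      simp
    have hstep : reduceStepA (pre ++ some prev :: (cur :: rest).map some) pre.length =
        (if cur - prev = 1 then (pre ++ [none]) ++ some (cur - 1) :: rest.map some
         else if cur - prev = 2 then (pre ++ [none]) ++ some (cur - 1) :: rest.map some
         else if cur - prev = 3 then (pre ++ [none]) ++ some (cur - 2) :: rest.map some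
         else (pre ++ [some prev]) ++ some cur :: rest.map some) := by
      simp only [reduceStepA, hget0, hget1]
      split_ifs with h1 h2 h3 <;>
        simp [List.map_cons, List.append_assoc]
    simp only [List.map_cons] at hstep ⊢
    rw [hstep]
    split_ifs with h1 h2 h3
    · have := ih (pre ++ [none]) (cur - 1)
      simp only [List.length_append, List.length_cons, List.length_nil, Nat.zero_add] at this
      rw [this, redSpec_cons, if_pos (by omega : 1 ≤ cur - prev ∧ cur - prev ≤ 3),
        if_pos (by omega : cur - prev ≤ 2)]
      simp
    · have := ih (pre ++ [none]) (cur - 1)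
      simp only [List.length_append, List.length_cons, List.length_nil, Nat.zero_add] at this
      rw [this, redSpec_cons, if_pos (by omega : 1 ≤ cur - prev ∧ cur - prev ≤ 3),
        if_pos (by omega : cur - prev ≤ 2)]
      simp
    · have := ih (pre ++ [none]) (cur - 2)
      simp only [List.length_append, List.length_cons, List.length_nil, Nat.zero_add] at this
      rw [this, redSpec_cons, if_pos (by omega : 1 ≤ cur - prev ∧ cur - prev ≤ 3),
        if_neg (by omega : ¬ cur - prev ≤ 2)]
      simp
    · have := ih (pre ++ [some prev]) cur
      simp only [List.length_append, List.length_cons, List.length_nil, Nat.zero_add] at this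
      rw [this, redSpec_cons, if_neg (by omega : ¬ (1 ≤ cur - prev ∧ cur - prev ≤ 3))]
      simp

-- ===== VERDICT (by name: the statement is the Claim_ definition above) =====
theorem reduce_indices_spec : Claim_equal_reduce_indices := by
  intro indices _
  unfold Spec_reduce_indices reduce_indices reduce_indices_alt
  cases indices with
  | nil => simp
  | cons first rest =>
    have hB := foldB_eq_redSpec rest [] first
    simp only [List.nil_append] at hB
    have hA := foldA_eq_redSpec rest [] first
    simp only [List.length_nil, List.nil_append, List.filterMap_nil] at hA
    simp only [List.length_cons, Nat.add_sub_cancel, List.map_cons, List.range_eq_range'] at hA ⊢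
    rw [List.foldl_cons]
    have h0 : reduceStepB [] first = [first] := by simp [reduceStepB]
    rw [h0, hA, hB]
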